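-- pv_equiv track=rewrite | github.com/akimov246/codewars | Number climber.py | climb
-- ===== SOURCE A (Python) =====
-- def climb(n):
--     x = n
--     result = [n]
--     while result[-1] != 1:
--         if x % 2:
--             x = (x - 1) // 2
--         else:
--             x = x // 2
--         result.append(int(x))
--     return result[::-1]
-- ===== SOURCE B (Python) =====
-- def climb(n):
--     return [n >> k for k in range(n.bit_length() - 1, -1, -1)]
-- ===== Notes on version B (the rewrite author's own statement) =====
-- stated objective: idiomatic
-- what changed: Replaces the while-loop that halves n, appends to a list and reverses it at the end with a single comprehension that emits each path element directly as a bit shift n >> k for k from bit_length-1 down to 0, so no mutation, parity branch or reversal is needed.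
-- outside the precondition, e.g. on climb(0): A does not finish within the time limit, B returns []
import Mathlib
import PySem

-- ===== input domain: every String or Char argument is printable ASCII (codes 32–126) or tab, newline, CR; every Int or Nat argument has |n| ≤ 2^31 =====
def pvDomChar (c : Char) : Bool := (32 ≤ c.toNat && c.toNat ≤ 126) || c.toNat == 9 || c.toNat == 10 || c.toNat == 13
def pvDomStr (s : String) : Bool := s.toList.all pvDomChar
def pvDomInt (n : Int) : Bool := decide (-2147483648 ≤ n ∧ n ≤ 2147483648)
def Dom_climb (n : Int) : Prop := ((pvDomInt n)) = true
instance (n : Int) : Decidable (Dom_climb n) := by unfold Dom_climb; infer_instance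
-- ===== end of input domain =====

-- B replaces A's halve-append-then-reverse while loop by one comprehension emitting n >> k
-- for k from bit_length-1 down to 0 (idiomatic, no reversal); equal on all n ≥ 1.

-- ===== PORT A =====
-- the while loop of A: state (x, result); fuel only makes the loop total
-- (for n ≥ 1 the loop takes bit_length(n) - 1 ≤ n.toNat steps, so the fuel never runs out inside Pre_)
def climbAux : Nat → Int → List Int → List Int
  | 0, _, result => result
  | fuel + 1, x, result =>
    if PySem.List.pyGet? result (-1) ≠ some 1 then
      let x' := if PySem.Int.mod x 2 ≠ 0 then PySem.Int.floordiv (x - 1) 2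
                else PySem.Int.floordiv x 2
      climbAux fuel x' (result ++ [x'])
    else result

def climb (n : Int) : List Int :=
  (PySem.List.slice? (climbAux (n.toNat + 1) n [n]) none none (-1)).getD []  -- result[::-1]

-- ===== PORT B =====
def climb_alt (n : Int) : List Int :=
  (PySem.List.pyRange ((PySem.Int.bitLength n : Int) - 1) (-1) (-1)).map
    (fun k => Int.shiftRight n k.toNat)  -- n >> k; every k in this range is ≥ 0, so .toNat is exact

-- ===== PRECONDITION & SPEC =====
-- A's while loop never terminates for n ≤ 0 (x never reaches 1): Pre_ is n ≥ 1.
def Pre_climb (n : Int) : Prop := 1 ≤ n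
instance (n : Int) : Decidable (Pre_climb n) := by unfold Pre_climb; infer_instance
def pvWitness_climb : Int := (13)

def Spec_climb (n : Int) (out : List Int) : Prop := out = climb_alt n
instance (n : Int) (out : List Int) : Decidable (Spec_climb n out) := by unfold Spec_climb; infer_instance

-- ===== CLAIM (what is proved, stated in full; the proofs are below) =====
def Claim_equal_climb : Prop := ∀ (n : Int), Dom_climb n → Pre_climb n → Spec_climb n (climb n)

-- ===== LEMMAS AND PROOFS =====

-- reference path: [1, …, n//4, n//2, n] for n ≥ 1
def path (n : Int) : List Int :=
  if n ≤ 1 then [n] else path (PySem.Int.floordiv n 2) ++ [n]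
termination_by n.toNat
decreasing_by
  rw [PySem.Int.floordiv_eq_ediv_of_pos (by omega)]
  omega

theorem path_one : path 1 = [1] := by rw [path]; simp

theorem path_of_lt (n : Int) (h : 1 < n) :
    path n = path (PySem.Int.floordiv n 2) ++ [n] := by
  rw [path]; simp [not_le.mpr h]

theorem floordiv_pos_of_lt (n : Int) (h : 1 < n) : 1 ≤ PySem.Int.floordiv n 2 := by
  rw [PySem.Int.floordiv_eq_ediv_of_pos (by omega)]; omega

theorem floordiv_lt_self (n : Int) (h : 1 < n) : PySem.Int.floordiv n 2 < n := by
  rw [PySem.Int.floordiv_eq_ediv_of_pos (by omega)]; omega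

-- A's parity branch computes x // 2 in both arms
theorem odd_branch (x : Int) (h : PySem.Int.mod x 2 ≠ 0) :
    PySem.Int.floordiv (x - 1) 2 = PySem.Int.floordiv x 2 := by
  rw [PySem.Int.mod_eq_emod_of_pos (by omega)] at h
  rw [PySem.Int.floordiv_eq_ediv_of_pos (by omega), PySem.Int.floordiv_eq_ediv_of_pos (by omega)]
  omega

-- loop invariant: with the last element of result equal to x, enough fuel, and x ≥ 1,
-- the loop extends acc by the reversed path of x
theorem climbAux_spec : ∀ (fuel : Nat) (x : Int) (acc : List Int),
    1 ≤ x → x.toNat ≤ fuel → climbAux fuel x (acc ++ [x]) = acc ++ (path x).reverse := by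
  intro fuel
  induction fuel with
  | zero => intro x acc hx hf; omega
  | succ f ih =>
    intro x acc hx hf
    rw [climbAux, PySem.List.pyGet?_neg_one_append_singleton]
    by_cases h1 : x = 1
    · subst h1; simp [path_one]
    · have hx2 : 1 < x := by omega
      have hstep : (if PySem.Int.mod x 2 ≠ 0 then PySem.Int.floordiv (x - 1) 2
          else PySem.Int.floordiv x 2) = PySem.Int.floordiv x 2 := by
        split_ifs with hm
        · exact odd_branch x hm
        · rfl
      simp only [ne_eq, Option.some.injEq, h1, not_false_iff, if_pos, hstep]
      have hrec : climbAux f (PySem.Int.floordiv x 2)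
          ((acc ++ [x]) ++ [PySem.Int.floordiv x 2]) =
          (acc ++ [x]) ++ (path (PySem.Int.floordiv x 2)).reverse := by
        refine ih _ _ (floordiv_pos_of_lt x hx2) ?_
        have := floordiv_lt_self x hx2
        have := floordiv_pos_of_lt x hx2
        omega
      rw [hrec, path_of_lt x hx2]
      simp

theorem climb_eq_path (n : Int) (h : 1 ≤ n) : climb n = path n := by
  have := climbAux_spec (n.toNat + 1) n [] h (by omega)
  simp only [List.nil_append] at this
  rw [climb, this, PySem.List.slice?_none_none_neg_one]
  simp

-- the descending range [m, …, 0] is the shifted descending range [m-1, …, 0] plus a final 0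
theorem range_desc_shift (m : Int) (hm : 0 ≤ m) :
    PySem.List.pyRange m (-1) (-1) =
      (PySem.List.pyRange (m - 1) (-1) (-1)).map (· + 1) ++ [0] := by
  rw [PySem.List.pyRange_neg_one, PySem.List.pyRange_neg_one]
  have h1 : (m - -1).toNat = m.toNat + 1 := by omega
  have h2 : (m - 1 - -1).toNat = m.toNat := by omega
  rw [h1, h2, List.range_succ]
  simp only [List.map_append, List.map_map, List.map_cons, List.map_nil]
  congr 1
  · refine List.map_congr_left ?_
    intro k _
    simp only [Function.comp_apply]
    ring
  · simp [Int.toNat_of_nonneg hm]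

-- shifting by one more bit is shifting the half
theorem shift_succ (n : Int) (k : Nat) :
    Int.shiftRight n (k + 1) = Int.shiftRight (PySem.Int.floordiv n 2) k := by
  show n >>> (k + 1) = (PySem.Int.floordiv n 2) >>> k
  rw [Int.shiftRight_eq_div_pow, Int.shiftRight_eq_div_pow,
    PySem.Int.floordiv_eq_ediv_of_pos (by omega : (0:Int) < 2),
    Int.ediv_ediv_of_nonneg (by norm_num : (0:Int) ≤ 2)]
  norm_num [pow_succ, mul_comm]

theorem bitLength_pos (n : Int) (h : 1 ≤ n) : 1 ≤ PySem.Int.bitLength n := by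
  by_contra hc
  have h0 : PySem.Int.bitLength n = 0 := by omega
  have := PySem.Int.lt_two_pow_bitLength n
  rw [h0] at this; simp at this; omega

theorem climb_alt_eq_path : ∀ (N : Nat) (n : Int), 1 ≤ n → n.toNat ≤ N →
    climb_alt n = path n := by
  intro N
  induction N with
  | zero => intro n hn hN; omega
  | succ N ih =>
    intro n hn hN
    by_cases h1 : n = 1
    · subst h1; rw [path_one]; decide
    · have hn2 : 1 < n := by omega
      have hbl : PySem.Int.bitLength n = PySem.Int.bitLength (PySem.Int.floordiv n 2) + 1 :=
        PySem.Int.bitLength_of_pos (by omega)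
      have hbl2 : 1 ≤ PySem.Int.bitLength (PySem.Int.floordiv n 2) :=
        bitLength_pos _ (floordiv_pos_of_lt n hn2)
      rw [climb_alt, hbl]
      rw [range_desc_shift _ (by push_cast; omega)]
      rw [List.map_append, List.map_map]
      have hmap : (PySem.List.pyRange (((PySem.Int.bitLength (PySem.Int.floordiv n 2) + 1 : Nat) : Int) - 1 - 1)
            (-1) (-1)).map ((fun k : Int => Int.shiftRight n k.toNat) ∘ (· + 1)) =
          (PySem.List.pyRange ((PySem.Int.bitLength (PySem.Int.floordiv n 2) : Int) - 1)
            (-1) (-1)).map (fun k : Int => Int.shiftRight (PySem.Int.floordiv n 2) k.toNat) := by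
        have hb : (((PySem.Int.bitLength (PySem.Int.floordiv n 2) + 1 : Nat) : Int) - 1 - 1) =
            ((PySem.Int.bitLength (PySem.Int.floordiv n 2) : Int) - 1) := by push_cast; ring
        rw [hb]
        refine List.map_congr_left ?_
        intro k hk
        have hk0 : 0 ≤ k := by
          have := (PySem.List.mem_pyRange_neg_one.mp hk).1
          omega
        have hkt : (k + 1).toNat = k.toNat + 1 := by omega
        simp only [Function.comp_apply, hkt, shift_succ]
      rw [hmap]
      have halt : (PySem.List.pyRange ((PySem.Int.bitLength (PySem.Int.floordiv n 2) : Int) - 1)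
            (-1) (-1)).map (fun k : Int => Int.shiftRight (PySem.Int.floordiv n 2) k.toNat) =
          climb_alt (PySem.Int.floordiv n 2) := by rw [climb_alt]
      rw [halt, ih (PySem.Int.floordiv n 2) (floordiv_pos_of_lt n hn2)
        (by have := floordiv_lt_self n hn2; have := floordiv_pos_of_lt n hn2; omega),
        path_of_lt n hn2]
      have hsh0 : Int.shiftRight n 0 = n := by
        show n >>> (0 : Nat) = n
        rw [Int.shiftRight_eq_div_pow]
        simp
      simp [hsh0]

-- ===== VERDICT (by name: the statement is the Claim_ definition above) =====
theorem climb_spec : Claim_equal_climb := by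
  intro n _ hpre
  unfold Spec_climb
  rw [climb_eq_path n hpre, climb_alt_eq_path n.toNat n hpre (by omega)]
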